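-- pv_equiv track=rewrite | github.com/Kampfzwerg42/Morodax | Wahrscheinlichkeitsgraphen.py | ErgMultiSuccess
-- ===== SOURCE A (Python) =====
-- def ErgMultiSuccess(newX,gesX,amount):
--     if(gesX<=-12):
--         if(newX<=-12):
--             return 1,-12
--         return 0,-12
--     if(newX<-12):
--         return -1,0
--     #<-6 -> auto lost
--     diff=max(-6,gesX-newX)
--     penality=2
--     oriAmount=amount
--     while(amount>=penality):
--         amount-=penality
--         diff+=1
--     if(diff>(7*(oriAmount-1))):
--         #<-7 -> vorher verloren
--         return -1,0
--     return 0,diff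
-- ===== SOURCE B (Python) =====
-- def ErgMultiSuccess(newX, gesX, amount):
--     if gesX <= -12:
--         return (1 if newX <= -12 else 0), -12
--     if newX < -12:
--         return -1, 0
--     diff = max(-6, gesX - newX) + max(0, amount // 2)
--     if diff > 7 * (amount - 1):
--         return -1, 0
--     return 0, diff
-- ===== Notes on version B (the rewrite author's own statement) =====
-- stated objective: faster
-- what changed: The decrement-by-2 while loop counting penalty steps is replaced by the closed form max(0, amount//2), making the function constant-time.
import Mathlib
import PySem

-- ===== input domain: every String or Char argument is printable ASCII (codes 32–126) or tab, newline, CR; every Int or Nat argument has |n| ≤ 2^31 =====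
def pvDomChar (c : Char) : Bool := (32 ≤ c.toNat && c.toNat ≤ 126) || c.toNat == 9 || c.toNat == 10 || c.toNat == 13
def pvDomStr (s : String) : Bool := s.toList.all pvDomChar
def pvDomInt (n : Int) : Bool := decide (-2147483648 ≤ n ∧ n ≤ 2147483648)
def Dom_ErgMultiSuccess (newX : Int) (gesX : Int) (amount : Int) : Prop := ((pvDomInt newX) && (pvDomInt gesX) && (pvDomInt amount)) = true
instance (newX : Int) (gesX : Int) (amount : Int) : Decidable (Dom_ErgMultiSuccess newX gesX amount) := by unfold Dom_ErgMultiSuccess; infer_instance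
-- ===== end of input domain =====

-- B replaces A's decrement-by-2 while loop with the closed form max(0, amount//2) (objective: faster).

-- ===== PORT A =====
-- A's while loop: 'while amount >= penality: amount -= penality; diff += 1' with penality = 2.
def pvLoopA (amount : Int) (diff : Int) : Int × Int :=
  if 2 ≤ amount then pvLoopA (amount - 2) (diff + 1) else (amount, diff)
termination_by amount.toNat
decreasing_by omega

def ErgMultiSuccess (newX : Int) (gesX : Int) (amount : Int) : Int × Int :=
  if gesX ≤ -12 then
    if newX ≤ -12 then (1, -12) else (0, -12)
  else if newX < -12 then (-1, 0)
  else
    let diff := max (-6) (gesX - newX)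
    let oriAmount := amount
    let r := pvLoopA amount diff
    if r.2 > 7 * (oriAmount - 1) then (-1, 0) else (0, r.2)

-- ===== PORT B =====
def ErgMultiSuccess_alt (newX : Int) (gesX : Int) (amount : Int) : Int × Int :=
  if gesX ≤ -12 then
    ((if newX ≤ -12 then 1 else 0), -12)
  else if newX < -12 then (-1, 0)
  else
    let diff := max (-6) (gesX - newX) + max 0 (PySem.Int.floordiv amount 2)
    if diff > 7 * (amount - 1) then (-1, 0) else (0, diff)

-- ===== PRECONDITION & SPEC =====
def Spec_ErgMultiSuccess (newX : Int) (gesX : Int) (amount : Int) (out : Int × Int) : Prop := out = ErgMultiSuccess_alt newX gesX amount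
instance (newX : Int) (gesX : Int) (amount : Int) (out : Int × Int) : Decidable (Spec_ErgMultiSuccess newX gesX amount out) := by unfold Spec_ErgMultiSuccess; infer_instance

-- ===== CLAIM (what is proved, stated in full; the proofs are below) =====
def Claim_equal_ErgMultiSuccess : Prop := ∀ (newX : Int) (gesX : Int) (amount : Int), Dom_ErgMultiSuccess newX gesX amount → Spec_ErgMultiSuccess newX gesX amount (ErgMultiSuccess newX gesX amount)

-- ===== LEMMAS AND PROOFS =====
-- The loop's diff output is the closed form diff + max 0 (amount // 2).
theorem pvLoopA_snd (amount diff : Int) :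
    (pvLoopA amount diff).2 = diff + max 0 (PySem.Int.floordiv amount 2) := by
  fun_induction pvLoopA amount diff with
  | case1 amount diff h ih =>
      rw [ih]
      have h2 : PySem.Int.floordiv (amount - 2) 2 + 1 = PySem.Int.floordiv amount 2 := by
        rw [PySem.Int.floordiv_eq_ediv_of_pos (by omega), PySem.Int.floordiv_eq_ediv_of_pos (by omega)]
        omega
      have hge : 0 ≤ PySem.Int.floordiv (amount - 2) 2 := by
        rw [PySem.Int.floordiv_eq_ediv_of_pos (by omega)]; omega
      omega
  | case2 amount diff h =>
      have : PySem.Int.floordiv amount 2 ≤ 0 := by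
        rw [PySem.Int.floordiv_eq_ediv_of_pos (by omega)]; omega
      simp; omega

-- ===== VERDICT (by name: the statement is the Claim_ definition above) =====
theorem ErgMultiSuccess_spec : Claim_equal_ErgMultiSuccess := by
  intro newX gesX amount _
  unfold Spec_ErgMultiSuccess ErgMultiSuccess ErgMultiSuccess_alt
  split_ifs with h1 h2 h3 <;> simp_all [pvLoopA_snd]
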